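-- pv_equiv track=rewrite | github.com/harmening/signature_extraction | signature_extractor/segmentation.py | prepare_text_for_classification
-- ===== SOURCE A (Python) =====
-- def prepare_text_for_classification(text):
--     lines = text.split('\n')
--     lines = [l.strip() for l in lines if len(l.strip()) > 0]
--     output = []
--
--     for idx in range(len(lines)):
--         curr = lines[idx]
--         next = "" if idx == len(lines) - 1 else lines[idx + 1]
--         prev = "" if idx == 0 else lines[idx - 1]
--         output.append([curr, prev, next])
--     return output
-- ===== SOURCE B (Python) =====
-- def prepare_text_for_classification(text):
--     # Streaming single pass: no intermediate line list; the third field of a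
--     # row is filled in retroactively when the following non-empty line arrives.
--     output = []
--     pending = None
--     for raw in text.split('\n'):
--         s = raw.strip()
--         if not s:
--             continue
--         if pending is None:
--             pending = [s, '', '']
--         else:
--             pending[2] = s
--             output.append(pending)
--             pending = [s, pending[0], '']
--     if pending is not None:
--         output.append(pending)
--     return output
-- ===== Notes on version B (the rewrite author's own statement) =====
-- stated objective: alternative
-- what changed: Replaces A's two-stage build (materialise the filtered line list, then index it with idx-1/idx+1 boundary arithmetic) by a single streaming pass over the raw split that never builds the line list: each row is emitted one step late, its third field filled in retroactively when the following non-empty line arrives.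
import Mathlib
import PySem

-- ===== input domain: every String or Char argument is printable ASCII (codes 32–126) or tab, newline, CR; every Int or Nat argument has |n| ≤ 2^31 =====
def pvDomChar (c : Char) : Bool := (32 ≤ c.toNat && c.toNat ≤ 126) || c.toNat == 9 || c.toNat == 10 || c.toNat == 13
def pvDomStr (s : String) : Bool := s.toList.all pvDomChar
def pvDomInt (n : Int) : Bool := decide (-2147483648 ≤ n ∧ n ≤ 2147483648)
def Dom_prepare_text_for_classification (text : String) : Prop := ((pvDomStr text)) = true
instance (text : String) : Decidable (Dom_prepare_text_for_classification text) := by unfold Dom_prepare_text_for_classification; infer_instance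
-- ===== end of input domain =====

-- B replaces A's build-list-then-index scheme by one streaming pass over the raw split
-- that fills each row's third field retroactively; same cost, alternative decomposition.

-- ===== PORT A =====
def prepare_text_for_classification (text : String) : List (List String) :=
  let lines := ((PySem.Str.split? text "\n").getD []).filterMap
    (fun l => if (PySem.Str.strip l).length > 0 then some (PySem.Str.strip l) else none)
  (PySem.List.pyRange 0 lines.length 1).foldl (fun output idx =>
    let curr := PySem.List.pyGetD lines idx ""
    let next := if idx == (lines.length : Int) - 1 then "" else PySem.List.pyGetD lines (idx + 1) ""
    let prev := if idx == 0 then "" else PySem.List.pyGetD lines (idx - 1) ""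
    output ++ [[curr, prev, next]]) []

-- ===== PORT B =====
-- state: (output, pending); pending = some (curr, prev) stands for the Python row
-- [curr, prev, ''] not yet appended (its 'next' still open), none for Python's None.
def prepare_text_for_classification_alt (text : String) : List (List String) :=
  let st := ((PySem.Str.split? text "\n").getD []).foldl
    (fun (st : List (List String) × Option (String × String)) raw =>
      let s := PySem.Str.strip raw
      if s.length = 0 then st
      else
        match st.2 with
        | none => (st.1, some (s, ""))
        | some (c, p) => (st.1 ++ [[c, p, s]], some (s, c)))
    ([], none)
  match st.2 with
  | none => st.1
  | some (c, p) => st.1 ++ [[c, p, ""]]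

-- ===== PRECONDITION & SPEC =====
def Spec_prepare_text_for_classification (text : String) (out : List (List String)) : Prop := out = prepare_text_for_classification_alt text
instance (text : String) (out : List (List String)) : Decidable (Spec_prepare_text_for_classification text out) := by unfold Spec_prepare_text_for_classification; infer_instance

-- ===== CLAIM (what is proved, stated in full; the proofs are below) =====
def Claim_equal_prepare_text_for_classification : Prop := ∀ (text : String), Dom_prepare_text_for_classification text → Spec_prepare_text_for_classification text (prepare_text_for_classification text)

-- ===== LEMMAS AND PROOFS =====

-- common reference shape: rows prev lines emits [curr, prev, next] with "" at the edges
def pvRows : String → List String → List (List String)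
  | _, [] => []
  | prev, c :: rest => [c, prev, (rest.head?).getD ""] :: pvRows c rest

-- B's inner step and finishing move, named (definitionally equal to the port's inline code)
def pvStep (st : List (List String) × Option (String × String)) (s : String) :
    List (List String) × Option (String × String) :=
  match st.2 with
  | none => (st.1, some (s, ""))
  | some (c, p) => (st.1 ++ [[c, p, s]], some (s, c))

def pvRawStep (st : List (List String) × Option (String × String)) (raw : String) :
    List (List String) × Option (String × String) :=
  let s := PySem.Str.strip raw
  if s.length = 0 then st else pvStep st s

def pvFinish (st : List (List String) × Option (String × String)) : List (List String) :=
  match st.2 with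
  | none => st.1
  | some (c, p) => st.1 ++ [[c, p, ""]]

-- A's indexed loop equals the zip-of-shifted-lists form (stepping stone)
lemma pv_A_zip (lines : List String) :
    (PySem.List.pyRange 0 lines.length 1).foldl (fun output idx =>
      let curr := PySem.List.pyGetD lines idx ""
      let next := if idx == (lines.length : Int) - 1 then "" else PySem.List.pyGetD lines (idx + 1) ""
      let prev := if idx == 0 then "" else PySem.List.pyGetD lines (idx - 1) ""
      output ++ [[curr, prev, next]]) []
    = (lines.zip (("" :: lines.dropLast).zip (lines.tail ++ [""]))).map (fun t => [t.1, t.2.1, t.2.2]) := by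
  rw [PySem.List.foldl_append_singleton_eq_map, PySem.List.pyRange_zero_natCast]
  simp only [List.nil_append, List.map_map]
  apply List.ext_getElem
  · simp only [List.length_map, List.length_range, List.length_zip, List.length_cons,
      List.length_dropLast, List.length_append, List.length_tail]
    omega
  · intro i h1 h2
    simp only [List.length_map, List.length_range] at h1
    simp only [List.getElem_map, List.getElem_range, Function.comp_apply, List.getElem_zip]
    have hcur : PySem.List.pyGetD lines (i : Int) "" = lines[i] := by
      rw [PySem.List.pyGetD_natCast]; exact List.getD_eq_getElem _ _ h1
    simp only [List.cons.injEq, and_true]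
    refine ⟨hcur, ?_, ?_⟩
    · rcases Nat.eq_zero_or_pos i with h0 | h0
      · subst h0; simp
      · obtain ⟨j, rfl⟩ : ∃ j, i = j + 1 := ⟨i - 1, by omega⟩
        have : ((j : Int) + 1) - 1 = (j : Int) := by ring
        simp only [List.getElem_cons_succ, List.getElem_dropLast]
        rw [if_neg (by simp; omega), Nat.cast_add, Nat.cast_one, this,
          PySem.List.pyGetD_natCast]
        exact List.getD_eq_getElem _ _ (by omega)
    rcases Nat.lt_or_ge i (lines.length - 1) with hlt | hge
    · have hne : ((i : Int) == (lines.length : Int) - 1) = false := by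
        simp; omega
      rw [hne]
      simp only [Bool.false_eq_true, if_false]
      rw [List.getElem_append_left (by simp [List.length_tail]; omega),
        List.getElem_tail, show (i : Int) + 1 = ((i + 1 : Nat) : Int) by push_cast; ring,
        PySem.List.pyGetD_natCast]
      exact List.getD_eq_getElem _ _ (by omega)
    · have hi : i = lines.length - 1 := by omega
      have heq : ((i : Int) == (lines.length : Int) - 1) = true := by
        simp; omega
      rw [heq]
      simp only [if_true]
      rw [List.getElem_append_right (by simp [List.length_tail]; omega)]
      simp

-- the zip form equals pvRows
lemma pv_zip_rows (prev : String) (lines : List String) :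
    (lines.zip ((prev :: lines.dropLast).zip (lines.tail ++ [""]))).map (fun t => [t.1, t.2.1, t.2.2])
    = pvRows prev lines := by
  induction lines generalizing prev with
  | nil => simp [pvRows]
  | cons c rest ih =>
    cases rest with
    | nil => simp [pvRows]
    | cons s rest' =>
      simp only [List.dropLast_cons₂, List.tail_cons, List.zip_cons_cons, List.map_cons, pvRows,
        List.head?_cons, Option.getD_some, List.cons_append, List.cons.injEq, true_and]
      exact ih c

-- skipping blank lines in B's fold = folding pvStep over the filterMap'd list
set_option maxHeartbeats 1000000 in
lemma pv_fold_skip (raws : List String)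
    (st : List (List String) × Option (String × String)) :
    raws.foldl pvRawStep st
    = (raws.filterMap (fun l => if (PySem.Str.strip l).length > 0 then some (PySem.Str.strip l) else none)).foldl
        pvStep st := by
  induction raws generalizing st with
  | nil => rfl
  | cons r rs ih =>
    simp only [List.foldl_cons, List.filterMap_cons, pvRawStep]
    by_cases h : (PySem.Str.strip r).length = 0
    · rw [if_pos h, if_neg (by omega)]
      exact ih st
    · rw [if_neg h, if_pos (by omega)]
      simp only [List.foldl_cons]
      exact ih _

-- B's plain fold, finished off, equals pvRows (strong form with a live pending row)
lemma pv_fold_rows_pending (rest : List String) (out : List (List String)) (c p : String) :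
    pvFinish (rest.foldl pvStep (out, some (c, p))) = out ++ pvRows p (c :: rest) := by
  induction rest generalizing out c p with
  | nil => simp [pvFinish, pvRows]
  | cons s rest' ih =>
    simp only [List.foldl_cons]
    show pvFinish (rest'.foldl pvStep (out ++ [[c, p, s]], some (s, c))) = _
    rw [ih]
    simp [pvRows]

-- ===== VERDICT (by name: the statement is the Claim_ definition above) =====
theorem prepare_text_for_classification_spec : Claim_equal_prepare_text_for_classification := by
  intro text _
  unfold Spec_prepare_text_for_classification prepare_text_for_classification prepare_text_for_classification_alt
  rw [pv_A_zip, pv_zip_rows]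
  show pvRows "" _ = pvFinish (((PySem.Str.split? text "\n").getD []).foldl pvRawStep ([], none))
  rw [pv_fold_skip]
  generalize (((PySem.Str.split? text "\n").getD []).filterMap
    (fun l => if (PySem.Str.strip l).length > 0 then some (PySem.Str.strip l) else none)) = lines
  cases lines with
  | nil => simp [pvRows, pvFinish]
  | cons c rest =>
    simp only [List.foldl_cons]
    show pvRows "" (c :: rest) = pvFinish (rest.foldl pvStep ([], some (c, "")))
    rw [pv_fold_rows_pending]
    simp
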